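-- pv_equiv track=rewrite | github.com/shixunD/ebookCollection | scripts/generate_feed.py | parse_header_and_body
-- ===== SOURCE A (Python) =====
-- def parse_header_and_body(text):
--     """Split the file into a metadata header dict and the body paragraphs."""
--     header = {}
--     body_lines = []
--     in_header = True
--     for line in text.splitlines():
--         stripped = line.strip()
--         if in_header:
--             if stripped == "---":
--                 in_header = False
--                 continue
--             # lines like "KEY: value"
--             if ":" in stripped:
--                 key, _, val = stripped.partition(":")
--                 header[key.strip()] = val.strip()
--             # else skip junk header lines
--         else:
--             body_lines.append(line)
--     return header, body_lines
-- ===== SOURCE B (Python) =====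
-- def parse_header_and_body(text):
--     """Split the file into a metadata header dict and the body paragraphs."""
--     lines = text.splitlines()
--     try:
--         sep = next(i for i, line in enumerate(lines) if line.strip() == "---")
--     except StopIteration:
--         sep = len(lines)
--     header = {}
--     for line in lines[:sep]:
--         s = line.strip()
--         if ":" in s:
--             key, _, val = s.partition(":")
--             header[key.strip()] = val.strip()
--     return header, lines[sep + 1:]
-- ===== Notes on version B (the rewrite author's own statement) =====
-- stated objective: simpler
-- what changed: Replaces A's in_header boolean state machine with a decomposition: find the index of the first separator line (defaulting to the number of lines), build the header from the slice before it and take the slice after it as the body.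
import Mathlib
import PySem

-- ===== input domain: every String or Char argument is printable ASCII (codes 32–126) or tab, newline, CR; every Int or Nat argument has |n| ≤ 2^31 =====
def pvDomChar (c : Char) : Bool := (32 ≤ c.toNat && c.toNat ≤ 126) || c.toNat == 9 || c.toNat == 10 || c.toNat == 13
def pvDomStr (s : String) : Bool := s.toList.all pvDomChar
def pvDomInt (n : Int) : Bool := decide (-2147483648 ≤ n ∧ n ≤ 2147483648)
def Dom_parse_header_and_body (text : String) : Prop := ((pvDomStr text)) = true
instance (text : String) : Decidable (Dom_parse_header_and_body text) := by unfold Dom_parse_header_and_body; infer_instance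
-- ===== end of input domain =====

-- B replaces A's in_header state machine by a split-at-first-'---' decomposition (objective: simpler).

-- shared helper: s.partition(":") restricted to the case ':' ∈ s (both Pythons guard on ':' in s);
-- exact there: splits at the FIRST ':'.
def pyPartitionColon : List Char → List Char × List Char
  | [] => ([], [])
  | c :: rest =>
    if c = ':' then ([], rest)
    else
      let p := pyPartitionColon rest
      (c :: p.1, p.2)

-- ===== PORT A =====
-- the body of A's for-loop, with state (header, body_lines, in_header)
def phbStepA (st : PySem.Dict String String × List String × Bool) (line : String) :
    PySem.Dict String String × List String × Bool :=
  let stripped := PySem.Str.strip line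
  if st.2.2 then
    if stripped = "---" then (st.1, st.2.1, false)
    else if PySem.Str.isIn ":" stripped then
      let p := pyPartitionColon stripped.toList
      (st.1.insert (PySem.Str.strip (String.ofList p.1)) (PySem.Str.strip (String.ofList p.2)), st.2.1, true)
    else st
  else (st.1, st.2.1 ++ [line], false)

def parse_header_and_body (text : String) : (List (String × String)) × List String :=
  let r := (PySem.Str.splitlines text).foldl phbStepA (PySem.Dict.empty, [], true)
  (r.1.items, r.2.1)

-- ===== PORT B =====
-- the body of B's header for-loop
def phbStepB (d : PySem.Dict String String) (line : String) : PySem.Dict String String :=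
  let s := PySem.Str.strip line
  if PySem.Str.isIn ":" s then
    let p := pyPartitionColon s.toList
    d.insert (PySem.Str.strip (String.ofList p.1)) (PySem.Str.strip (String.ofList p.2))
  else d

def parse_header_and_body_alt (text : String) : (List (String × String)) × List String :=
  let lines := PySem.Str.splitlines text
  let sep := match lines.findIdx? (fun l => PySem.Str.strip l = "---") with
             | some i => i
             | none => lines.length
  let header := (lines.take sep).foldl phbStepB PySem.Dict.empty   -- lines[:sep], sep ≥ 0
  (header.items, lines.drop (sep + 1))                             -- lines[sep+1:]

-- ===== PRECONDITION & SPEC =====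
def Spec_parse_header_and_body (text : String) (out : (List (String × String)) × List String) : Prop := out = parse_header_and_body_alt text
instance (text : String) (out : (List (String × String)) × List String) : Decidable (Spec_parse_header_and_body text out) := by unfold Spec_parse_header_and_body; infer_instance

-- ===== CLAIM (what is proved, stated in full; the proofs are below) =====
def Claim_equal_parse_header_and_body : Prop := ∀ (text : String), Dom_parse_header_and_body text → Spec_parse_header_and_body text (parse_header_and_body text)

-- ===== LEMMAS AND PROOFS =====

-- once in_header is false, A just appends every remaining line to body
theorem foldA_false (ls : List String) (d : PySem.Dict String String) (b : List String) :
    ls.foldl phbStepA (d, b, false) = (d, b ++ ls, false) := by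
  induction ls generalizing b with
  | nil => simp
  | cons l ls ih => simp [phbStepA, ih]

def phbSep (ls : List String) : Nat :=
  match ls.findIdx? (fun l => PySem.Str.strip l = "---") with
  | some i => i
  | none => ls.length

-- main invariant: A's fold from the in_header state is B's decomposition
theorem foldA_true (ls : List String) (d : PySem.Dict String String) (b : List String) :
    ls.foldl phbStepA (d, b, true) =
      ((ls.take (phbSep ls)).foldl phbStepB d, b ++ ls.drop (phbSep ls + 1),
        (ls.findIdx? (fun l => PySem.Str.strip l = "---")).isNone) := by
  induction ls generalizing d b with
  | nil => simp [phbSep]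
  | cons l ls ih =>
    by_cases h : PySem.Str.strip l = "---"
    · have hs : phbSep (l :: ls) = 0 := by simp [phbSep, List.findIdx?_cons, h]
      simp [List.foldl_cons, phbStepA, h, foldA_false, hs, List.findIdx?_cons]
    · have hs : phbSep (l :: ls) = phbSep ls + 1 := by
        simp only [phbSep, List.findIdx?_cons, h, decide_eq_true_eq]
        cases ls.findIdx? (fun l => PySem.Str.strip l = "---") <;> simp
      rw [List.foldl_cons]
      have hstep : phbStepA (d, b, true) l = (phbStepB d l, b, true) := by
        unfold phbStepA phbStepB
        simp only [if_true]
        rw [if_neg h]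
        split <;> rfl
      rw [hstep, ih]
      simp [hs, List.findIdx?_cons, h]

-- ===== VERDICT (by name: the statement is the Claim_ definition above) =====
theorem parse_header_and_body_spec : Claim_equal_parse_header_and_body := by
  intro text _
  unfold Spec_parse_header_and_body parse_header_and_body parse_header_and_body_alt
  rw [foldA_true]
  simp [phbSep]
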